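-- pv_equiv track=rewrite | github.com/deut-erium/WriteUps | _drafts/2022/foobar22/crypto/sigma-bg/solve.py | encrypt1
-- ===== SOURCE A (Python) =====
-- def encrypt1(m,h,n):
--     while len(m)%h!=0:
--         m = '0'+ m
--     l = len(m) // h
--     r = 89657896589
--     x=pow(r,2,n)
--     C = ''
--     for i in range(l):
--         x = pow(x,2,n)
--         p_i = (bin(x)[2:])[-h:]
--         c_i = int(p_i,2)^int(m[i*h:(i+1)*h],2)
--         cx = bin(c_i)[2:].zfill(h)
--         C+=cx
--     return C
-- ===== SOURCE B (Python) =====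
-- def encrypt1(m, h, n):
--     m = '0' * ((-len(m)) % h) + m
--     C = ''
--     for i in reversed(range(len(m) // h)):
--         x = pow(89657896589, 2 << (i + 1), n)
--         c = int(bin(x)[2:][-h:], 2) ^ int(m[i * h:(i + 1) * h], 2)
--         C = bin(c)[2:].zfill(h) + C
--     return C
-- ===== Notes on version B (the rewrite author's own statement) =====
-- stated objective: alternative
-- what changed: Removes the carried squaring state: each block's keystream is computed independently by one closed-form modular exponentiation x_i = pow(r, 2<<(i+1), n) (the random-access BBS property), the blocks are traversed in reverse order and the ciphertext is built back-to-front by prepending, and the while-loop padding is replaced by closed-form modular padding.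
-- outside the precondition, e.g. on encrypt1('1', 1, -1): A returns '1', B returns '1'
import Mathlib
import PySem

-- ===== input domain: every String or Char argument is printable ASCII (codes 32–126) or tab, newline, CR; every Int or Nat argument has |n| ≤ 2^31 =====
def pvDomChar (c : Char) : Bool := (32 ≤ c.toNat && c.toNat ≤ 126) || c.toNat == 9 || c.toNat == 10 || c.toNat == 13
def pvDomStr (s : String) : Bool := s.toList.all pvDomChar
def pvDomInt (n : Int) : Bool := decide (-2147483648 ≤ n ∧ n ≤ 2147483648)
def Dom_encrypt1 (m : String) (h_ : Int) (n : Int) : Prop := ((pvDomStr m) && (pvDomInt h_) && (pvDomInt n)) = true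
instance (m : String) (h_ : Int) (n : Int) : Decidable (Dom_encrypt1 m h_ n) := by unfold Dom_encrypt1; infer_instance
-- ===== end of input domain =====

-- B replaces A's carried squaring state by an independent closed-form modular exponentiation
-- per block (x_i = r^(2^(i+2)) mod n) and builds the ciphertext back-to-front over the blocks
-- in reverse order; padding is computed in closed form (objective: alternative, not faster).

-- ===== PORT A =====
-- 'while len(m)%h!=0: m = "0"+m' — fuel-bounded recursion; fuel h.toNat suffices whenever h ≥ 1 (Pre_)
def pvPadA : Nat → List Char → Int → List Char
  | 0, ml, _ => ml
  | fuel+1, ml, h => if PySem.Int.mod (ml.length : Int) h ≠ 0 then pvPadA fuel ('0' :: ml) h else ml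

-- int(s, 2) raises ValueError where ofCharsBase? is none; Pre_ excludes those inputs, so .getD 0 is never taken
def encrypt1 (m : String) (h_ : Int) (n : Int) : String :=
  let mc := pvPadA h_.toNat m.toList h_
  let l := PySem.Int.floordiv (mc.length : Int) h_
  let x0 := PySem.Int.powMod 89657896589 2 n
  let res := (PySem.List.pyRange 0 l 1).foldl (fun (st : Int × List Char) i =>
    let x := PySem.Int.powMod st.1 2 n
    let p := PySem.List.slice (PySem.List.slice (PySem.Int.toBinChars0b x) (some 2) none) (some (-h_)) none
    let c := PySem.Int.bxor ((PySem.Int.ofCharsBase? p 2).getD 0)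
      ((PySem.Int.ofCharsBase? (PySem.List.slice mc (some (i * h_)) (some ((i + 1) * h_))) 2).getD 0)
    let cx := PySem.Chars.zfill (PySem.List.slice (PySem.Int.toBinChars0b c) (some 2) none) h_
    (x, st.2 ++ cx)) (x0, [])
  String.ofList res.2

-- ===== PORT B =====
-- Source B: closed-form padding; reversed(range(len(m)//h)) with per-block x = pow(r, 2 << (i+1), n);
-- ciphertext assembled by prepending each block string.
def encrypt1_alt (m : String) (h_ : Int) (n : Int) : String :=
  let pad := PySem.Int.mod (-(m.toList.length : Int)) h_
  let mc := List.replicate pad.toNat '0' ++ m.toList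
  let res := ((PySem.List.pyRange 0 (PySem.Int.floordiv (mc.length : Int) h_) 1).reverse).foldl
    (fun (C : List Char) i =>
      let x := PySem.Int.powMod 89657896589 (2 <<< (i.toNat + 1)) n
      let c := PySem.Int.bxor
        ((PySem.Int.ofCharsBase? (PySem.List.slice (PySem.List.slice (PySem.Int.toBinChars0b x) (some 2) none) (some (-h_)) none) 2).getD 0)
        ((PySem.Int.ofCharsBase? (PySem.List.slice mc (some (i * h_)) (some ((i + 1) * h_))) 2).getD 0)
      PySem.Chars.zfill (PySem.List.slice (PySem.Int.toBinChars0b c) (some 2) none) h_ ++ C) []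
  String.ofList res

-- ===== PRECONDITION & SPEC =====
-- Pre_ admits the inputs on which A returns: negative block width (A returns '' for any n != 0),
-- empty message with h >= 1 (A returns '' for any n != 0), and the main case h >= 1, n >= 1 with every
-- h-wide block of the padded message parseable by int(.,2) (the zero padding hits only the first
-- block, and for parseability 2 leading zeros behave like any larger count, so Pre_ caps them at 2). Excluded: h = 0 / n = 0 (ZeroDivisionError /
-- ValueError), unparseable blocks (ValueError), and negative moduli with a nonempty message, on which A
-- raises except for accidental corners like n = -1 where pow(.,.,n) is constantly 0 and A and B agree.
def Pre_encrypt1 (m : String) (h_ : Int) (n : Int) : Prop :=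
  n ≠ 0 ∧ (h_ < 0 ∨ (1 ≤ h_ ∧ (m.toList = [] ∨ (1 ≤ n ∧
    ∀ k ∈ List.range ((m.toList.length
        + (h_.toNat - m.toList.length % h_.toNat) % h_.toNat) / h_.toNat),
      (PySem.Int.ofCharsBase?
        (if k = 0 then
          List.replicate (min ((h_.toNat - m.toList.length % h_.toNat) % h_.toNat) 2) '0'
            ++ m.toList.take (h_.toNat - (h_.toNat - m.toList.length % h_.toNat) % h_.toNat)
         else
          (m.toList.drop (k * h_.toNat - (h_.toNat - m.toList.length % h_.toNat) % h_.toNat)).take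
            h_.toNat) 2).isSome = true))))
instance (m : String) (h_ : Int) (n : Int) : Decidable (Pre_encrypt1 m h_ n) := by
  unfold Pre_encrypt1; infer_instance
def pvWitness_encrypt1 : String × Int × Int := ("1011", 2, 11)

def Spec_encrypt1 (m : String) (h_ : Int) (n : Int) (out : String) : Prop := out = encrypt1_alt m h_ n
instance (m : String) (h_ : Int) (n : Int) (out : String) : Decidable (Spec_encrypt1 m h_ n out) := by
  unfold Spec_encrypt1; infer_instance

-- ===== CLAIM (what is proved, stated in full; the proofs are below) =====
def Claim_equal_encrypt1 : Prop := ∀ (m : String) (h_ : Int) (n : Int),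
  Dom_encrypt1 m h_ n → Pre_encrypt1 m h_ n → Spec_encrypt1 m h_ n (encrypt1 m h_ n)

-- ===== LEMMAS AND PROOFS =====

-- canonical pieces shared by the two shape lemmas
def pvPad (ml : List Char) (H : Nat) : List Char :=
  List.replicate ((H - ml.length % H) % H) '0' ++ ml
def pvL (ml : List Char) (H : Nat) : Nat := (pvPad ml H).length / H
def pvChunk (mc : List Char) (H k : Nat) : List Char := (mc.drop (k * H)).take H
def pvStep (n x : Int) : Int := PySem.Int.powMod x 2 n
def pvKS (h_ x : Int) : List Char :=
  PySem.List.slice (PySem.List.slice (PySem.Int.toBinChars0b x) (some 2) none) (some (-h_)) none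
def pvCX (h_ : Int) (k blk : List Char) : List Char :=
  PySem.Chars.zfill (PySem.List.slice (PySem.Int.toBinChars0b
    (PySem.Int.bxor ((PySem.Int.ofCharsBase? k 2).getD 0) ((PySem.Int.ofCharsBase? blk 2).getD 0)))
    (some 2) none) h_
def pvIter (n : Int) : Nat → Int → Int
  | 0, x => x
  | k+1, x => pvStep n (pvIter n k x)

lemma padA_eq (H : Nat) (hH : 1 ≤ H) :
    ∀ (fuel : Nat) (ml : List Char), (H - ml.length % H) % H ≤ fuel →
      pvPadA fuel ml (H : Int) = List.replicate ((H - ml.length % H) % H) '0' ++ ml := by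
  intro fuel
  induction fuel with
  | zero =>
    intro ml hle
    have h0 : (H - ml.length % H) % H = 0 := Nat.le_zero.mp hle
    rw [h0]
    simp only [List.replicate_zero, List.nil_append]
    rfl
  | succ f ih =>
    intro ml hle
    by_cases hr : ml.length % H = 0
    · rw [show (H - ml.length % H) % H = 0 by simp [hr]]
      simp [pvPadA, PySem.Int.mod_natCast, hr]
    · have hH1 : H ≠ 1 := by intro h1; subst h1; omega
      have hrlt : ml.length % H < H := Nat.mod_lt _ (by omega)
      have hcount : (H - ml.length % H) % H = H - ml.length % H :=
        Nat.mod_eq_of_lt (by omega)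
      have hsucc : (ml.length + 1) % H =
          if ml.length % H + 1 = H then 0 else ml.length % H + 1 := by
        rw [Nat.add_mod, Nat.mod_eq_of_lt (show (1:Nat) < H by omega)]
        by_cases he : ml.length % H + 1 = H
        · rw [if_pos he, he, Nat.mod_self]
        · rw [if_neg he, Nat.mod_eq_of_lt (by omega)]
      have hcond : PySem.Int.mod ((ml.length : Nat) : Int) ((H : Nat) : Int) ≠ 0 := by
        rw [PySem.Int.mod_natCast]
        exact_mod_cast hr
      have hstep : pvPadA (f + 1) ml (H : Int) = pvPadA f ('0' :: ml) (H : Int) := by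
        rw [show pvPadA (f + 1) ml (H : Int) =
          (if PySem.Int.mod ((ml.length : Nat) : Int) ((H : Nat) : Int) ≠ 0 then
            pvPadA f ('0' :: ml) (H : Int) else ml) from rfl, if_pos hcond]
      have hlen : ('0' :: ml).length = ml.length + 1 := rfl
      have hc' : (H - ('0' :: ml).length % H) % H = H - ml.length % H - 1 := by
        rw [hlen, hsucc]
        by_cases he : ml.length % H + 1 = H
        · rw [if_pos he]
          simp only [Nat.sub_zero, Nat.mod_self]
          omega
        · rw [if_neg he, Nat.mod_eq_of_lt (show H - (ml.length % H + 1) < H by omega)]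
          omega
      rw [hstep, ih ('0' :: ml) (by rw [hc']; omega)]
      rw [hc', hcount]
      rw [show H - ml.length % H = (H - ml.length % H - 1) + 1 by omega, List.replicate_succ']
      simp [List.append_assoc]

lemma pad_toNat (len H : Nat) (hH : 1 ≤ H) :
    (PySem.Int.mod (-(len : Int)) (H : Int)).toNat = (H - len % H) % H := by
  rw [PySem.Int.mod_eq_emod_of_pos (by exact_mod_cast hH), Int.neg_emod]
  by_cases hd : (H : Int) ∣ (len : Int)
  · have hr : len % H = 0 := by
      rcases Int.natCast_dvd_natCast.mp hd with ⟨c, rfl⟩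
      exact Nat.mul_mod_right H c
    rw [if_pos hd, hr]
    simp [Nat.mod_self]
  · have hrlt : len % H < H := Nat.mod_lt _ (by omega)
    rw [if_neg hd]
    have hmod : (len : Int) % (H : Int) = ((len % H : Nat) : Int) := by
      exact (Int.natCast_mod len H).symm
    rw [hmod]
    have h1 : ((H : Int).natAbs : Int) - ((len % H : Nat) : Int) = ((H - len % H : Nat) : Int) := by
      simp only [Int.natAbs_natCast]
      omega
    rw [h1, Int.toNat_natCast, Nat.mod_eq_of_lt (show H - len % H < H by omega)]

lemma pvPad_len (ml : List Char) (H : Nat) (hH : 1 ≤ H) :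
    (pvPad ml H).length = pvL ml H * H := by
  have hdvd : H ∣ (pvPad ml H).length := by
    unfold pvPad
    rw [List.length_append, List.length_replicate]
    by_cases hr : ml.length % H = 0
    · simpa [hr] using Nat.dvd_of_mod_eq_zero hr
    · have hrlt : ml.length % H < H := Nat.mod_lt _ (by omega)
      rw [Nat.mod_eq_of_lt (show H - ml.length % H < H by omega)]
      have hdm := Nat.div_add_mod ml.length H
      refine ⟨ml.length / H + 1, ?_⟩
      rw [Nat.mul_add, Nat.mul_one]
      omega
  unfold pvL
  exact (Nat.div_mul_cancel hdvd).symm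

lemma foldl_funext {A B : Type} {f g : A → B → A} (h : ∀ a b, f a b = g a b) :
    ∀ (l : List B) (i : A), l.foldl f i = l.foldl g i := by
  intro l
  induction l with
  | nil => intro i; rfl
  | cons x t ih => intro i; rw [List.foldl_cons, List.foldl_cons, h]; exact ih _

set_option maxHeartbeats 1000000 in
lemma A_shape (m : String) (n : Int) (H : Nat) (hH : 1 ≤ H) :
    encrypt1 m (H : Int) n =
      String.ofList (((List.range (pvL m.toList H)).foldl
        (fun (st : Int × List Char) k =>
          (pvStep n st.1, st.2 ++ pvCX (H : Int) (pvKS (H : Int) (pvStep n st.1))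
            (pvChunk (pvPad m.toList H) H k)))
        (PySem.Int.powMod 89657896589 2 n, [])).2) := by
  have hlen : ((pvPad m.toList H).length : Int) = ((pvL m.toList H * H : Nat) : Int) := by
    exact_mod_cast pvPad_len m.toList H hH
  simp only [encrypt1, Int.toNat_natCast]
  rw [padA_eq H hH H m.toList (le_of_lt (Nat.mod_lt _ (by omega)))]
  rw [show (List.replicate ((H - m.toList.length % H) % H) '0' ++ m.toList) = pvPad m.toList H
    from rfl]
  rw [hlen, PySem.Int.floordiv_natCast, Nat.mul_div_cancel _ (show 0 < H by omega)]
  rw [PySem.List.pyRange_one]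
  simp only [sub_zero, Int.toNat_natCast]
  rw [List.foldl_map]
  refine congrArg String.ofList (congrArg Prod.snd (foldl_funext ?_ _ _))
  intro st k
  simp only [pvStep, pvKS, pvCX, pvChunk, zero_add]
  rw [show ((k : Nat) : Int) * ((H : Nat) : Int) = ((k * H : Nat) : Int) by push_cast; ring]
  rw [show (((k : Nat) : Int) + 1) * ((H : Nat) : Int) = ((k * H : Nat) : Int) + ((H : Nat) : Int)
    by push_cast; ring]
  rw [PySem.List.slice_natCast_add]

-- A's fold, fissioned: the carried square-and-accumulate state equals the iterate pvIter,
-- and the accumulated string is the concatenation of the per-block strings.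
lemma foldA_flat (n : Int) (F : Int → Nat → List Char) :
    ∀ (L : Nat) (x0 : Int) (C0 : List Char),
      (List.range L).foldl (fun (st : Int × List Char) k =>
          (pvStep n st.1, st.2 ++ F (pvStep n st.1) k)) (x0, C0)
        = (pvIter n L x0, C0 ++ (List.range L).flatMap (fun k => F (pvIter n (k+1) x0) k)) := by
  intro L
  induction L with
  | zero => intro x0 C0; simp [pvIter]
  | succ L ih =>
    intro x0 C0
    rw [List.range_succ]
    simp only [List.foldl_append, List.foldl_cons, List.foldl_nil, ih, List.flatMap_append,
      List.flatMap_cons, List.flatMap_nil]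
    refine Prod.ext rfl ?_
    simp [pvIter, List.append_assoc]

-- the carried state in closed form: i+1 squarings of r² mod n give r^(2^(i+2)) mod n
lemma powMod_powMod (a : Int) (e : Nat) (n : Int) (hn : 0 < n) :
    PySem.Int.powMod (PySem.Int.powMod a e n) 2 n = PySem.Int.powMod a (e * 2) n := by
  simp only [PySem.Int.powMod, PySem.Int.mod_eq_emod_of_pos hn]
  rw [pow_mul, pow_two, pow_two, Int.mul_emod (a ^ e) (a ^ e) n]

lemma pvIter_closed (n : Int) (hn : 0 < n) :
    ∀ (k : Nat), pvIter n k (PySem.Int.powMod 89657896589 2 n)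
      = PySem.Int.powMod 89657896589 (2 ^ (k + 1)) n := by
  intro k
  induction k with
  | zero => simp [pvIter]
  | succ k ih =>
    show pvStep n (pvIter n k _) = _
    rw [ih, pvStep, powMod_powMod _ _ _ hn, ← pow_succ]

-- B's reverse loop with prepending builds the in-order concatenation
lemma rev_foldl_prepend {α : Type} (f : α → List Char) :
    ∀ (l : List α) (C0 : List Char),
      l.reverse.foldl (fun C i => f i ++ C) C0 = l.flatMap f ++ C0 := by
  intro l
  induction l with
  | nil => intro C0; simp
  | cons a t ih =>
    intro C0
    simp only [List.reverse_cons, List.foldl_append, List.foldl_cons, List.foldl_nil, ih,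
      List.flatMap_cons, List.append_assoc]

set_option maxHeartbeats 1000000 in
lemma B_shape (m : String) (n : Int) (H : Nat) (hH : 1 ≤ H) :
    encrypt1_alt m (H : Int) n =
      String.ofList ((List.range (pvL m.toList H)).flatMap (fun k =>
        pvCX (H : Int) (pvKS (H : Int) (PySem.Int.powMod 89657896589 (2 ^ (k + 2)) n))
          (pvChunk (pvPad m.toList H) H k))) := by
  have hlen : ((pvPad m.toList H).length : Int) = ((pvL m.toList H * H : Nat) : Int) := by
    exact_mod_cast pvPad_len m.toList H hH
  simp only [encrypt1_alt]
  rw [pad_toNat m.toList.length H hH]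
  rw [show (List.replicate ((H - m.toList.length % H) % H) '0' ++ m.toList) = pvPad m.toList H
    from rfl]
  rw [hlen, PySem.Int.floordiv_natCast, Nat.mul_div_cancel _ (show 0 < H by omega)]
  rw [PySem.List.pyRange_one]
  simp only [sub_zero, Int.toNat_natCast]
  rw [← List.map_reverse, List.foldl_map, rev_foldl_prepend, List.append_nil]
  refine congrArg String.ofList (List.flatMap_congr ?_)
  intro k _
  simp only [Int.toNat_natCast, zero_add]
  rw [show (2 <<< (k + 1) : Nat) = 2 ^ (k + 2) by
    rw [Nat.shiftLeft_eq]; ring]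
  simp only [pvKS, pvCX, pvChunk]
  rw [show ((k : Nat) : Int) * ((H : Nat) : Int) = ((k * H : Nat) : Int) by push_cast; ring]
  rw [show (((k : Nat) : Int) + 1) * ((H : Nat) : Int) = ((k * H : Nat) : Int) + ((H : Nat) : Int)
    by push_cast; ring]
  rw [PySem.List.slice_natCast_add]


-- degenerate cases on which both programs return "" without entering the block loop
lemma fd_nonpos (a b : Int) (ha : 0 ≤ a) (hb : b < 0) : PySem.Int.floordiv a b ≤ 0 := by
  have hfm := PySem.Int.floordiv_mul_add_mod a b
  have hmb := PySem.Int.mod_neg_bounds (a := a) hb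
  by_contra hq
  push Not at hq
  nlinarith [hfm, hmb.2, mul_pos hq (neg_pos.mpr hb)]

lemma pvPadA_nil (fuel : Nat) (h_ : Int) (hh : 0 < h_) : pvPadA fuel [] h_ = [] := by
  cases fuel with
  | zero => rfl
  | succ f =>
    show (if PySem.Int.mod (([] : List Char).length : Int) h_ ≠ 0 then _ else _) = _
    rw [show (([] : List Char).length : Int) = 0 from rfl,
      PySem.Int.mod_eq_emod_of_pos hh, Int.zero_emod]
    simp

lemma A_triv (m : String) (h_ n : Int) (hc : h_ < 0 ∨ (1 ≤ h_ ∧ m.toList = [])) :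
    encrypt1 m h_ n = "" := by
  simp only [encrypt1]
  rcases hc with hneg | ⟨h1, hm⟩
  · rw [show h_.toNat = 0 from Int.toNat_of_nonpos (by omega), show pvPadA 0 m.toList h_ = m.toList from rfl]
    have hl : PySem.Int.floordiv (m.toList.length : Int) h_ ≤ 0 :=
      fd_nonpos _ _ (by positivity) hneg
    rw [PySem.List.pyRange_one]
    simp only [sub_zero, Int.toNat_of_nonpos hl, List.range_zero, List.map_nil, List.foldl_nil]
  · rw [hm, pvPadA_nil _ _ (by omega)]
    rw [show (([] : List Char).length : Int) = 0 from rfl,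
      PySem.Int.floordiv_eq_ediv_of_pos (by omega), Int.zero_ediv]
    rw [PySem.List.pyRange_one]
    simp only [sub_zero, Int.toNat_zero, List.range_zero, List.map_nil, List.foldl_nil]

lemma B_triv (m : String) (h_ n : Int) (hc : h_ < 0 ∨ (1 ≤ h_ ∧ m.toList = [])) :
    encrypt1_alt m h_ n = "" := by
  simp only [encrypt1_alt]
  rcases hc with hneg | ⟨h1, hm⟩
  · have hp : (PySem.Int.mod (-(m.toList.length : Int)) h_).toNat = 0 :=
      Int.toNat_of_nonpos (PySem.Int.mod_neg_bounds (a := -(m.toList.length : Int)) hneg).2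
    rw [hp]
    simp only [List.replicate_zero, List.nil_append]
    have hl : PySem.Int.floordiv (m.toList.length : Int) h_ ≤ 0 :=
      fd_nonpos _ _ (by positivity) hneg
    rw [PySem.List.pyRange_one]
    simp only [sub_zero, Int.toNat_of_nonpos hl, List.range_zero, List.map_nil,
      List.reverse_nil, List.foldl_nil]
  · rw [hm]
    have hp : (PySem.Int.mod (-(([] : List Char).length : Int)) h_).toNat = 0 := by
      rw [show (-(([] : List Char).length : Int)) = 0 from rfl,
        PySem.Int.mod_eq_emod_of_pos (by omega : (0:Int) < h_), Int.zero_emod]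
      rfl
    rw [hp]
    simp only [List.replicate_zero, List.nil_append]
    rw [show (([] : List Char).length : Int) = 0 from rfl,
      PySem.Int.floordiv_eq_ediv_of_pos (by omega : (0:Int) < h_), Int.zero_ediv]
    rw [PySem.List.pyRange_one]
    simp only [sub_zero, Int.toNat_zero, List.range_zero, List.map_nil,
      List.reverse_nil, List.foldl_nil]

-- ===== VERDICT (by name: the statement is the Claim_ definition above) =====
theorem encrypt1_spec : Claim_equal_encrypt1 := by
  intro m h_ n hdom hpre
  obtain ⟨hn0, hrest⟩ := hpre
  unfold Spec_encrypt1
  rcases hrest with hneg | ⟨h1, hrest⟩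
  · rw [A_triv m h_ n (Or.inl hneg), B_triv m h_ n (Or.inl hneg)]
  rcases hrest with hm | ⟨hn, _⟩
  · rw [A_triv m h_ n (Or.inr ⟨h1, hm⟩), B_triv m h_ n (Or.inr ⟨h1, hm⟩)]
  have hh : h_ = ((h_.toNat : Nat) : Int) := by omega
  have hH : 1 ≤ h_.toNat := by omega
  rw [hh, A_shape m n h_.toNat hH, B_shape m n h_.toNat hH]
  rw [foldA_flat n (fun x k => pvCX ((h_.toNat : Nat) : Int) (pvKS ((h_.toNat : Nat) : Int) x)
    (pvChunk (pvPad m.toList h_.toNat) h_.toNat k))]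
  refine congrArg String.ofList ?_
  simp only [List.nil_append]
  refine List.flatMap_congr ?_
  intro k _
  rw [pvIter_closed n (by omega) (k + 1)]
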